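-- pv_equiv track=rewrite | github.com/ICRAR/ngas | src/ngamsCore/ngamsLib/ngamsDbCore.py | getNgasFilesCols
-- ===== SOURCE A (Python) =====
-- _ngasFilesDef = [["nf.disk_id",                "NGAS_FILES_DISK_ID"],
--                  ["nf.file_name",              "NGAS_FILES_FILE_NAME"],
--                  ["nf.file_id",                "NGAS_FILES_FILE_ID"],
--                  ["nf.file_version",           "NGAS_FILES_FILE_VER"],
--                  ["nf.format",                 "NGAS_FILES_FORMAT"],
--                  ["nf.file_size",              "NGAS_FILES_FILE_SIZE"],
--                  ["nf.uncompressed_file_size", "NGAS_FILES_UNCOMPR_FILE_SIZE"],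
--                  ["nf.compression",            "NGAS_FILES_COMPRESSION"],
--                  ["nf.ingestion_date",         "NGAS_FILES_INGEST_DATE"],
--                  ["nf.file_ignore",            "NGAS_FILES_IGNORE"],
--                  ["nf.checksum",               "NGAS_FILES_CHECKSUM"],
--                  ["nf.checksum_plugin",        "NGAS_FILES_CHECKSUM_PI"],
--                  ["nf.file_status",            "NGAS_FILES_FILE_STATUS"],
--                  ["nf.creation_date",          "NGAS_FILES_CREATION_DATE"],
--                  ["nf.io_time",                "NGAS_FILES_IO_TIME"],
--                  ["nf.ingestion_rate",         "NGAS_FILES_INGEST_RATE"],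
--                  ["nf.container_id",           "NGAS_FILES_CONTAINER_ID"],
--                  ]
--
-- def getNgasFilesCols(file_ignore_columnname):
--     """
--     Return reference to a string defining the lay-out of the table.
--
--     Returns:   Reference to string listing all columns (string).
--     """
--     colnames = []
--     for colDef in _ngasFilesDef:
--         colname = colDef[0]
--         if colname == 'nf.file_ignore':
--             colnames.append('nf.%s' % (file_ignore_columnname,))
--         else:
--             colnames.append(colname)
--     return ', '.join(colnames)
-- ===== SOURCE B (Python) =====
-- # B: closed-form template — the fixed column list is a precomputed constant split
-- # around the single variable slot; the function is one string concatenation.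
--
-- _NGAS_FILES_COLS_PREFIX = (
--     "nf.disk_id, nf.file_name, nf.file_id, nf.file_version, nf.format, "
--     "nf.file_size, nf.uncompressed_file_size, nf.compression, "
--     "nf.ingestion_date, nf."
-- )
-- _NGAS_FILES_COLS_SUFFIX = (
--     ", nf.checksum, nf.checksum_plugin, nf.file_status, nf.creation_date, "
--     "nf.io_time, nf.ingestion_rate, nf.container_id"
-- )
--
-- def getNgasFilesCols(file_ignore_columnname):
--     return _NGAS_FILES_COLS_PREFIX + file_ignore_columnname + _NGAS_FILES_COLS_SUFFIX
-- ===== Notes on version B (the rewrite author's own statement) =====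
-- stated objective: simpler
-- what changed: The per-column loop with its equality test for the variable column and the final join are replaced by a precomputed constant column-list template split at the single variable slot; the function is one string concatenation.
import Mathlib
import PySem

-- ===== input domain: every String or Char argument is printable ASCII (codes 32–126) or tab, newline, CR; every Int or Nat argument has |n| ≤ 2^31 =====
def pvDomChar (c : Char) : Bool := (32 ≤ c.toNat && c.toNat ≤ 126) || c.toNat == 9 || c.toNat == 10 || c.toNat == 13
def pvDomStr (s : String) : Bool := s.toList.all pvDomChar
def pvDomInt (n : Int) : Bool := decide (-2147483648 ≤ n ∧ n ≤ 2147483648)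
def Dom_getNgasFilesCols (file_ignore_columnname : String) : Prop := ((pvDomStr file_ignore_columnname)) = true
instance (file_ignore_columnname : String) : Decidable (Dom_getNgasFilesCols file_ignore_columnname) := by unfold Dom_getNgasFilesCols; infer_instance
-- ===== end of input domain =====

-- B replaces A's per-column loop and join by a precomputed constant column-list
-- template split at the single variable slot (simpler; same result).


-- ===== PORT A =====
def ngasFilesDef : List (String × String) :=
  [("nf.disk_id",                "NGAS_FILES_DISK_ID"),
   ("nf.file_name",              "NGAS_FILES_FILE_NAME"),
   ("nf.file_id",                "NGAS_FILES_FILE_ID"),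
   ("nf.file_version",           "NGAS_FILES_FILE_VER"),
   ("nf.format",                 "NGAS_FILES_FORMAT"),
   ("nf.file_size",              "NGAS_FILES_FILE_SIZE"),
   ("nf.uncompressed_file_size", "NGAS_FILES_UNCOMPR_FILE_SIZE"),
   ("nf.compression",            "NGAS_FILES_COMPRESSION"),
   ("nf.ingestion_date",         "NGAS_FILES_INGEST_DATE"),
   ("nf.file_ignore",            "NGAS_FILES_IGNORE"),
   ("nf.checksum",               "NGAS_FILES_CHECKSUM"),
   ("nf.checksum_plugin",        "NGAS_FILES_CHECKSUM_PI"),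
   ("nf.file_status",            "NGAS_FILES_FILE_STATUS"),
   ("nf.creation_date",          "NGAS_FILES_CREATION_DATE"),
   ("nf.io_time",                "NGAS_FILES_IO_TIME"),
   ("nf.ingestion_rate",         "NGAS_FILES_INGEST_RATE"),
   ("nf.container_id",           "NGAS_FILES_CONTAINER_ID")]

def getNgasFilesCols (file_ignore_columnname : String) : String :=
  let colnames : List String :=
    ngasFilesDef.foldl (fun acc colDef =>
      let colname := colDef.1
      if colname == "nf.file_ignore" then
        acc ++ ["nf." ++ file_ignore_columnname]   -- 'nf.%s' % (…,)
      else
        acc ++ [colname]) []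
  PySem.Str.join ", " colnames

-- ===== PORT B =====
def ngasFilesColsPrefix : String :=
  "nf.disk_id, nf.file_name, nf.file_id, nf.file_version, nf.format, nf.file_size, nf.uncompressed_file_size, nf.compression, nf.ingestion_date, nf."
def ngasFilesColsSuffix : String :=
  ", nf.checksum, nf.checksum_plugin, nf.file_status, nf.creation_date, nf.io_time, nf.ingestion_rate, nf.container_id"

def getNgasFilesCols_alt (file_ignore_columnname : String) : String :=
  ngasFilesColsPrefix ++ file_ignore_columnname ++ ngasFilesColsSuffix

-- ===== PRECONDITION & SPEC =====
def Spec_getNgasFilesCols (file_ignore_columnname : String) (out : String) : Prop := out = getNgasFilesCols_alt file_ignore_columnname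
instance (file_ignore_columnname : String) (out : String) : Decidable (Spec_getNgasFilesCols file_ignore_columnname out) := by unfold Spec_getNgasFilesCols; infer_instance

-- ===== CLAIM (what is proved, stated in full; the proofs are below) =====
def Claim_equal_getNgasFilesCols : Prop := ∀ (file_ignore_columnname : String), Dom_getNgasFilesCols file_ignore_columnname → Spec_getNgasFilesCols file_ignore_columnname (getNgasFilesCols file_ignore_columnname)

-- ===== LEMMAS AND PROOFS =====
theorem getNgasFilesCols_eq_alt (x : String) :
    getNgasFilesCols x = getNgasFilesCols_alt x := by
  apply String.toList_injective
  simp [getNgasFilesCols, getNgasFilesCols_alt, ngasFilesDef,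
        ngasFilesColsPrefix, ngasFilesColsSuffix, PySem.Str.toList_join,
        PySem.Chars.join, String.toList_append, List.intercalate]

-- ===== VERDICT (by name: the statement is the Claim_ definition above) =====
theorem getNgasFilesCols_spec : Claim_equal_getNgasFilesCols := by
  intro x _
  exact getNgasFilesCols_eq_alt x
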